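-- pv_equiv track=rewrite | github.com/propertools/crowsong | tools/harvester/harvester.py | parse_meta_sidecar
-- ===== SOURCE A (Python) =====
-- def _normalise(text):
--     """Normalise line endings to LF."""
--     return text.replace("\r\n", "\n").replace("\r", "\n")
--
-- def parse_meta_sidecar(text):
--     """Parse a metadata sidecar into a dict."""
--     meta = {}
--     current_key = None
--     for line in _normalise(text).split("\n"):
--         if line.startswith("    ") and current_key is not None:
--             meta[current_key] += "\n" + line[4:]
--         elif "=" in line:
--             key, _, value = line.partition("=")
--             current_key = key.strip()
--             meta[current_key] = value
--         else:
--             current_key = None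
--     return meta
-- ===== SOURCE B (Python) =====
-- def _normalise(text):
--     """Normalise line endings to LF."""
--     return text.replace("\r\n", "\n").replace("\r", "\n")
--
-- def parse_meta_sidecar(text):
--     """Parse a metadata sidecar into a dict (cursor-based, no state variable)."""
--     meta = {}
--     lines = _normalise(text).split("\n")
--     n = len(lines)
--     i = 0
--     while i < n:
--         line = lines[i]
--         i += 1
--         if "=" in line:
--             key, _, value = line.partition("=")
--             key = key.strip()
--             meta[key] = value
--             while i < n and lines[i].startswith("    "):
--                 meta[key] += "\n" + lines[i][4:]
--                 i += 1
--     return meta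
-- ===== Notes on version B (the rewrite author's own statement) =====
-- stated objective: simpler
-- what changed: Replaces A's current_key state variable threaded through a single for-loop by an explicit cursor: an outer while loop over the split lines whose key-line branch runs an inner while loop that eagerly consumes the indented continuation lines.
import Mathlib
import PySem

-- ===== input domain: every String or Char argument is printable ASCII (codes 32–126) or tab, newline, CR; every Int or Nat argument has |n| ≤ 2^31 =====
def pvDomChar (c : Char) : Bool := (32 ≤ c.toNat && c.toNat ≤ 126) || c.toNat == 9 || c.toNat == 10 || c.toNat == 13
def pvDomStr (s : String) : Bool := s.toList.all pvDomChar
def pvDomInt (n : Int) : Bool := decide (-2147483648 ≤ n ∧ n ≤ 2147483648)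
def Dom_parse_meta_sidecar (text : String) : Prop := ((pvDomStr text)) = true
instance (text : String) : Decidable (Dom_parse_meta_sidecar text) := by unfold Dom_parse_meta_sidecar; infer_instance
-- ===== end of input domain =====

-- B replaces A's current_key state variable by an explicit cursor: an outer loop over the
-- lines that, on each "key=value" line, runs an inner loop eagerly consuming the indented
-- continuation lines (objective: simpler decomposition, same cost).

-- ===== PORT A =====

-- _normalise: text.replace("\r\n","\n").replace("\r","\n")
def pvNormalise (cs : List Char) : List Char :=
  PySem.Chars.replace (PySem.Chars.replace cs ['\r', '\n'] ['\n']) ['\r'] ['\n']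

-- str.partition("=") minus the middle component; exact when '=' occurs in l
-- (Chars.find points at the FIRST occurrence, as Python's partition splits at the first separator)
def pvPartitionEq (l : List Char) : List Char × List Char :=
  let i := (PySem.Chars.find l ['=']).toNat
  (l.take i, l.drop (i + 1))

-- one iteration of A's for-loop body over the state (meta, current_key)
def pvStepA (st : PySem.Dict (List Char) (List Char) × Option (List Char)) (line : List Char) :
    PySem.Dict (List Char) (List Char) × Option (List Char) :=
  if PySem.Chars.startswith line [' ', ' ', ' ', ' '] && st.2.isSome then
    -- meta[current_key] += "\n" + line[4:]  (current_key is present in meta whenever it is set)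
    (st.1.modify (st.2.getD []) [] (fun v => v ++ '\n' :: PySem.List.slice line (some 4)), st.2)
  else if PySem.Chars.isIn ['='] line then
    let p := pvPartitionEq line
    let key := PySem.Chars.strip p.1
    (st.1.insert key p.2, some key)
  else (st.1, none)

def parse_meta_sidecar (text : String) : List (String × String) :=
  let lines := PySem.Chars.splitOn (pvNormalise text.toList) ['\n']
  ((lines.foldl pvStepA (PySem.Dict.empty, none)).1.items).map
    (fun p => (String.ofList p.1, String.ofList p.2))

-- ===== PORT B =====

-- B's inner while loop: consume the leading indented continuation lines, appending to meta[key]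
def pvConsume (key : List Char) :
    PySem.Dict (List Char) (List Char) → List (List Char) →
    PySem.Dict (List Char) (List Char) × List (List Char)
  | m, [] => (m, [])
  | m, l :: rest =>
    if PySem.Chars.startswith l [' ', ' ', ' ', ' '] then
      pvConsume key (m.modify key [] (fun v => v ++ '\n' :: PySem.List.slice l (some 4))) rest
    else (m, l :: rest)

theorem pvConsume_snd_length_le (key : List Char) (m : PySem.Dict (List Char) (List Char))
    (ls : List (List Char)) : (pvConsume key m ls).2.length ≤ ls.length := by
  induction ls generalizing m with
  | nil => simp [pvConsume]
  | cons l rest ih =>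
    simp only [pvConsume]
    split
    · exact le_trans (ih _) (Nat.le_succ _)
    · simp

-- B's outer while loop over the cursor (the unprocessed suffix of lines)
def pvGo : List (List Char) → PySem.Dict (List Char) (List Char) →
    PySem.Dict (List Char) (List Char)
  | [], m => m
  | l :: rest, m =>
    if PySem.Chars.isIn ['='] l then
      let p := pvPartitionEq l
      let key := PySem.Chars.strip p.1
      let q := pvConsume key (m.insert key p.2) rest
      pvGo q.2 q.1
    else pvGo rest m
termination_by ls _ => ls.length
decreasing_by
  · exact Nat.lt_succ_of_le (pvConsume_snd_length_le _ _ _)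
  · simp

def parse_meta_sidecar_alt (text : String) : List (String × String) :=
  let lines := PySem.Chars.splitOn (pvNormalise text.toList) ['\n']
  ((pvGo lines PySem.Dict.empty).items).map (fun p => (String.ofList p.1, String.ofList p.2))

-- ===== PRECONDITION & SPEC =====
def Spec_parse_meta_sidecar (text : String) (out : List (String × String)) : Prop := out = parse_meta_sidecar_alt text
instance (text : String) (out : List (String × String)) : Decidable (Spec_parse_meta_sidecar text out) := by unfold Spec_parse_meta_sidecar; infer_instance

-- ===== CLAIM (what is proved, stated in full; the proofs are below) =====
def Claim_equal_parse_meta_sidecar : Prop := ∀ (text : String), Dom_parse_meta_sidecar text → Spec_parse_meta_sidecar text (parse_meta_sidecar text)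

-- ===== LEMMAS AND PROOFS =====

-- A's fold with no active key computes B's outer loop; with an active key k it computes
-- B's inner loop followed by the outer loop — proved together by induction on the lines.
theorem pvFold_eq_go (lines : List (List Char)) :
    (∀ m, (lines.foldl pvStepA (m, none)).1 = pvGo lines m) ∧
    (∀ m k, (lines.foldl pvStepA (m, some k)).1 =
      pvGo (pvConsume k m lines).2 (pvConsume k m lines).1) := by
  induction lines with
  | nil => simp [pvGo, pvConsume]
  | cons l rest ih =>
    obtain ⟨ih1, ih2⟩ := ih
    constructor
    · intro m
      rw [List.foldl_cons]
      by_cases hin : PySem.Chars.isIn ['='] l = true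
      · simp only [pvStepA, Option.isSome_none, Bool.and_false]
        rw [if_neg Bool.false_ne_true, if_pos hin, ih2]
        conv_rhs => rw [pvGo]
        simp [hin]
      · simp only [Bool.not_eq_true] at hin
        simp only [pvStepA, Option.isSome_none, Bool.and_false, hin]
        rw [if_neg Bool.false_ne_true, if_neg Bool.false_ne_true, ih1]
        conv_rhs => rw [pvGo]
        simp [hin]
    · intro m k
      rw [List.foldl_cons]
      by_cases hsw : PySem.Chars.startswith l [' ', ' ', ' ', ' '] = true
      · simp only [pvStepA, hsw, Option.isSome_some, Bool.and_self]
        rw [if_pos trivial, ih2]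
        simp [pvConsume, hsw]
      · simp only [Bool.not_eq_true] at hsw
        have hcons : pvConsume k m (l :: rest) = (m, l :: rest) := by
          simp [pvConsume, hsw]
        rw [hcons]
        by_cases hin : PySem.Chars.isIn ['='] l = true
        · simp only [pvStepA, hsw, Bool.false_and]
          rw [if_neg Bool.false_ne_true, if_pos hin, ih2]
          conv_rhs => rw [pvGo]
          simp [hin]
        · simp only [Bool.not_eq_true] at hin
          simp only [pvStepA, hsw, Bool.false_and, hin]
          rw [if_neg Bool.false_ne_true, if_neg Bool.false_ne_true, ih1]
          conv_rhs => rw [pvGo]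
          simp [hin]

-- ===== VERDICT (by name: the statement is the Claim_ definition above) =====
theorem parse_meta_sidecar_spec : Claim_equal_parse_meta_sidecar := by
  intro text _
  unfold Spec_parse_meta_sidecar parse_meta_sidecar parse_meta_sidecar_alt
  show ((((PySem.Chars.splitOn (pvNormalise text.toList) ['\n']).foldl pvStepA
      (PySem.Dict.empty, none)).1.items).map (fun p => (String.ofList p.1, String.ofList p.2))) = _
  rw [(pvFold_eq_go _).1]
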